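-- pv_equiv track=rewrite | github.com/mishradebashis7/100-Days-Of-Python-01 | talentioQ1.py | solve
-- ===== SOURCE A (Python) =====
-- def solve(s):
--     count_a = 0
--     count_b = 0
--     count_c = 0
--     delta_patterns = {}
--     delta_patterns[(0, 0)] = 1
--     for c in s:
--         if c == 'a':
--             count_a += 1
--         elif c == 'b':
--             count_b += 1
--         elif c == 'c':
--             count_c += 1
--         combo = (count_a - count_b, count_a - count_c)
--         if combo not in delta_patterns:
--             delta_patterns[combo] = 1
--         else:
--             delta_patterns[combo] += 1
--     total = 0
--     for count in delta_patterns.values():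
--         if count > 1:
--             total += (count * (count - 1)) // 2
--     return total
-- ===== SOURCE B (Python) =====
-- def solve(s):
--     total = 0
--     for i in range(len(s) + 1):
--         ca = 0
--         cb = 0
--         cc = 0
--         for ch in s[i:]:
--             if ch == 'a':
--                 ca += 1
--             elif ch == 'b':
--                 cb += 1
--             elif ch == 'c':
--                 cc += 1
--             if ca == cb == cc:
--                 total += 1
--     return total
-- ===== Notes on version B (the rewrite author's own statement) =====
-- stated objective: simpler
-- what changed: A's one-pass prefix-delta dictionary with the k*(k-1)/2 pair-count formula is replaced by the plain brute force: for every start index, extend the substring keeping the three running letter counts and add 1 whenever they are all equal.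
import Mathlib
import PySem

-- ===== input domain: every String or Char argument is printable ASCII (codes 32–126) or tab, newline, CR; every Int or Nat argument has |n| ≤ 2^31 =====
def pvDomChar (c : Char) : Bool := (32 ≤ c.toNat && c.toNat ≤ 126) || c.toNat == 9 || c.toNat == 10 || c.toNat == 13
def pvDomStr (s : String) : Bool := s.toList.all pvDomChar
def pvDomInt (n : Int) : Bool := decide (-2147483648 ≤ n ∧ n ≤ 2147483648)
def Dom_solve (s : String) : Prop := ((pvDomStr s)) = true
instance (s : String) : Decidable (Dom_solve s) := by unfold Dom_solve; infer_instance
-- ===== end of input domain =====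

-- B replaces A's prefix-delta dictionary with the plain brute force over all start positions
-- (objective: simpler — no hashmap, no pair-counting formula; it is O(n^2) where A is O(n)).

-- ===== PORT A =====
-- the if/elif/elif update of (count_a, count_b, count_c)
def bumpA (ca cb cc : Int) (c : Char) : Int × Int × Int :=
  if c = 'a' then (ca + 1, cb, cc)
  else if c = 'b' then (ca, cb + 1, cc)
  else if c = 'c' then (ca, cb, cc + 1)
  else (ca, cb, cc)

-- body of A's first loop: update the counts, then the dict entry at key combo
def stepA (st : (Int × Int × Int) × PySem.Dict (Int × Int) Int) (c : Char) :
    (Int × Int × Int) × PySem.Dict (Int × Int) Int :=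
  let t := bumpA st.1.1 st.1.2.1 st.1.2.2 c
  let combo := (t.1 - t.2.1, t.1 - t.2.2)
  let d := if st.2.contains combo = false then st.2.insert combo 1
           else st.2.insert combo (st.2.getD combo 0 + 1)
  (t, d)

def solve (s : String) : Int :=
  let st := s.toList.foldl stepA ((0, 0, 0), PySem.Dict.empty.insert (0, 0) 1)
  st.2.values.foldl
    (fun total cnt => if cnt > 1 then total + PySem.Int.floordiv (cnt * (cnt - 1)) 2 else total) 0

-- ===== PORT B =====
-- the same if/elif/elif count update, as B writes it in its inner loop
def bumpB (ca cb cc : Int) (c : Char) : Int × Int × Int :=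
  if c = 'a' then (ca + 1, cb, cc)
  else if c = 'b' then (ca, cb + 1, cc)
  else if c = 'c' then (ca, cb, cc + 1)
  else (ca, cb, cc)

-- body of B's inner loop: update the counts, bump total when ca == cb == cc
def stepB (st : (Int × Int × Int) × Int) (c : Char) : (Int × Int × Int) × Int :=
  let t := bumpB st.1.1 st.1.2.1 st.1.2.2 c
  (t, if t.1 = t.2.1 ∧ t.2.1 = t.2.2 then st.2 + 1 else st.2)

def solve_alt (s : String) : Int :=
  (PySem.List.pyRange 0 ((s.toList.length : Int) + 1)).foldl
    (fun total i =>
      ((PySem.List.slice s.toList (some i) none).foldl stepB ((0, 0, 0), total)).2) 0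

-- ===== PRECONDITION & SPEC =====
def Spec_solve (s : String) (out : Int) : Prop := out = solve_alt s
instance (s : String) (out : Int) : Decidable (Spec_solve s out) := by unfold Spec_solve; infer_instance

-- ===== CLAIM (what is proved, stated in full; the proofs are below) =====
def Claim_equal_solve : Prop := ∀ (s : String), Dom_solve s → Spec_solve s (solve s)

-- ===== LEMMAS AND PROOFS =====

-- one step of the running (count_a, count_b, count_c)
def bump (t : Int × Int × Int) (c : Char) : Int × Int × Int := bumpA t.1 t.2.1 t.2.2 c

-- the pair (count_a - count_b, count_a - count_c)
def combo (t : Int × Int × Int) : Int × Int := (t.1 - t.2.1, t.1 - t.2.2)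

-- the successive combos along a char list, starting from counts t
def prefList (t : Int × Int × Int) : List Char → List (Int × Int)
  | [] => []
  | c :: cs => combo (bump t c) :: prefList (bump t c) cs

-- the number of pairs (i, j), i < j, with l[i] = l[j]
def eqPairs : List (Int × Int) → Nat
  | [] => 0
  | x :: xs => xs.count x + eqPairs xs

theorem dstep_eq (d : PySem.Dict (Int × Int) Int) (x : Int × Int) :
    (if d.contains x = false then d.insert x 1 else d.insert x (d.getD x 0 + 1))
      = d.insert x (d.getD x 0 + 1) := by
  by_cases h : d.contains x = false
  · simp [h, PySem.Dict.getD_of_not_contains d 0 h]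
  · simp [h]

theorem foldl_stepA_snd (l : List Char) (t : Int × Int × Int) (d : PySem.Dict (Int × Int) Int) :
    (List.foldl stepA (t, d) l).2
      = List.foldl (fun d x => d.insert x (d.getD x 0 + 1)) d (prefList t l) := by
  induction l generalizing t d with
  | nil => rfl
  | cons c cs ih =>
      simp only [List.foldl_cons, prefList]
      rw [show stepA (t, d) c = (bump t c,
            d.insert (combo (bump t c)) (d.getD (combo (bump t c)) 0 + 1)) from by
        simp [stepA, bump, combo, dstep_eq]]
      exact ih _ _

theorem dict_eq_counter (l : List Char) :
    (List.foldl stepA ((0, 0, 0), PySem.Dict.empty.insert (0, 0) 1) l).2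
      = PySem.Dict.counter ((0, 0) :: prefList (0, 0, 0) l) := by
  rw [foldl_stepA_snd, ← PySem.Dict.foldl_insert_getD_add_one_eq_counter]
  simp [PySem.Dict.getD_empty]

theorem term_eq (tot : Int) (m : Nat) :
    (if ((m : Int)) > 1 then tot + PySem.Int.floordiv ((m : Int) * ((m : Int) - 1)) 2 else tot)
      = tot + ((m * (m - 1) / 2 : Nat) : Int) := by
  match m with
  | 0 => simp
  | 1 => simp
  | (n + 2) =>
      have h1 : ((n + 2 : Nat) : Int) > 1 := by push_cast; omega
      rw [if_pos h1]
      have h2 : ((n + 2 : Nat) : Int) * (((n + 2 : Nat) : Int) - 1) = (((n + 2) * (n + 1) : Nat) : Int) := by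
        push_cast; ring
      rw [h2, show (2 : Int) = ((2 : Nat) : Int) from rfl, PySem.Int.floordiv_natCast]
      norm_num

theorem solve_eq_g (s : String) :
    solve s = ((List.map (fun k => List.count k ((0,0) :: prefList (0,0,0) s.toList) *
        (List.count k ((0,0) :: prefList (0,0,0) s.toList) - 1) / 2)
        (PySem.Set.ofList ((0,0) :: prefList (0,0,0) s.toList))).sum : Nat) := by
  rw [show solve s = List.foldl
      (fun total cnt => if cnt > 1 then total + PySem.Int.floordiv (cnt * (cnt - 1)) 2 else total) 0
      ((List.foldl stepA ((0, 0, 0), PySem.Dict.empty.insert (0, 0) 1) s.toList).2.values) from rfl]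
  rw [dict_eq_counter]
  set K := (0,0) :: prefList (0,0,0) s.toList with hK
  have hv : (PySem.Dict.counter K).values
      = List.map (fun k => ((List.count k K : Nat) : Int)) (PySem.Set.ofList K) := by
    show ((PySem.Dict.counter K).items).map (·.2) = _
    rw [PySem.Dict.items_counter, List.map_map]
    rfl
  rw [hv, List.foldl_map]
  rw [PySem.List.foldl_congr_mem _ _
    (fun tot k => tot + ((List.count k K * (List.count k K - 1) / 2 : Nat) : Int)) 0
    (fun acc x _ => term_eq acc (List.count x K))]
  rw [PySem.List.foldl_add]
  simp [List.map_map]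
  rfl

-- ===== combinatorial core =====
theorem finset_sum_choose (K : List (Int × Int)) :
    (∑ v ∈ K.toFinset, (K.count v).choose 2) = eqPairs K := by
  induction K with
  | nil => simp [eqPairs]
  | cons x xs ih =>
    by_cases hx : x ∈ xs
    · have hxT : x ∈ xs.toFinset := List.mem_toFinset.mpr hx
      have hT : (x :: xs).toFinset = xs.toFinset := by
        simp [List.toFinset_cons, Finset.insert_eq_self.mpr hxT]
      rw [eqPairs, hT, ← Finset.add_sum_erase _ _ hxT]
      have hcx : (x :: xs).count x = xs.count x + 1 := List.count_cons_self
      have hch : (xs.count x + 1).choose 2 = xs.count x + (xs.count x).choose 2 := by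
        rw [Nat.choose_succ_succ, Nat.choose_one_right]
      have hrest : (∑ v ∈ xs.toFinset.erase x, ((x :: xs).count v).choose 2)
          = ∑ v ∈ xs.toFinset.erase x, (xs.count v).choose 2 := by
        refine Finset.sum_congr rfl fun v hv => ?_
        rw [List.count_cons_of_ne (Ne.symm (Finset.ne_of_mem_erase hv))]
      have ih2 : (xs.count x).choose 2 + (∑ v ∈ xs.toFinset.erase x, (xs.count v).choose 2)
          = eqPairs xs := (Finset.add_sum_erase _ _ hxT).trans ih
      rw [hcx, hch, hrest]
      omega
    · have hx' : x ∉ xs.toFinset := fun h => hx (List.mem_toFinset.mp h)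
      rw [eqPairs, List.toFinset_cons, Finset.sum_insert hx']
      have hcx : (x :: xs).count x = 1 := by
        rw [List.count_cons_self, List.count_eq_zero_of_not_mem hx]
      have hrest : (∑ v ∈ xs.toFinset, ((x :: xs).count v).choose 2)
          = ∑ v ∈ xs.toFinset, (xs.count v).choose 2 := by
        refine Finset.sum_congr rfl fun v hv => ?_
        have : v ≠ x := fun h => hx (h ▸ List.mem_toFinset.mp hv)
        rw [List.count_cons_of_ne (Ne.symm this)]
      rw [hcx, hrest, ih, List.count_eq_zero_of_not_mem hx]
      simp
  
theorem g_eq_eqPairs (K : List (Int × Int)) :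
    (List.map (fun k => K.count k * (K.count k - 1) / 2) (PySem.Set.ofList K)).sum = eqPairs K := by
  have hnd := PySem.Set.nodup_ofList K
  rw [← List.sum_toFinset _ hnd]
  have hT : (PySem.Set.ofList K).toFinset = K.toFinset := by
    ext v; simp [List.mem_toFinset, PySem.Set.mem_ofList]
  rw [hT, ← finset_sum_choose K]
  exact Finset.sum_congr rfl fun v _ => by rw [Nat.choose_two_right]

-- ===== B side =====
theorem foldl_stepB_snd (l : List Char) (t : Int × Int × Int) (tot : Int) :
    (List.foldl stepB (t, tot) l).2 = tot + ((prefList t l).count (0, 0) : Int) := by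
  induction l generalizing t tot with
  | nil => simp [prefList]
  | cons c cs ih =>
      rw [List.foldl_cons,
        show stepB (t, tot) c
          = (bump t c, if (bump t c).1 = (bump t c).2.1 ∧ (bump t c).2.1 = (bump t c).2.2
              then tot + 1 else tot) from rfl,
        ih]
      have hcond : ((bump t c).1 = (bump t c).2.1 ∧ (bump t c).2.1 = (bump t c).2.2)
          ↔ combo (bump t c) = ((0 : Int), (0 : Int)) := by
        unfold combo; constructor
        · rintro ⟨h1, h2⟩; simp [Prod.ext_iff]; omega
        · intro h; simp [Prod.ext_iff] at h; omega
      rw [prefList]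
      by_cases h : combo (bump t c) = ((0 : Int), (0 : Int))
      · rw [if_pos (hcond.mpr h), h, List.count_cons_self]
        push_cast; ring
      · rw [if_neg (fun hc => h (hcond.mp hc)),
          List.count_cons_of_ne h]

theorem combo_bump (t : Int × Int × Int) (c : Char) :
    combo (bump t c) = ((combo t).1 + (combo (bump (0, 0, 0) c)).1,
                        (combo t).2 + (combo (bump (0, 0, 0) c)).2) := by
  unfold bump bumpA combo
  split_ifs <;> simp only [Prod.mk.injEq] <;> constructor <;> omega

theorem prefList_shift (t u : Int × Int × Int) (l : List Char) :
    prefList t l = (prefList u l).map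
      (fun p => (p.1 + ((combo t).1 - (combo u).1), p.2 + ((combo t).2 - (combo u).2))) := by
  induction l generalizing t u with
  | nil => rfl
  | cons c cs ih =>
      rw [prefList, prefList, List.map_cons]
      have h1 : (combo (bump t c)).1 - (combo (bump u c)).1 = (combo t).1 - (combo u).1 := by
        rw [combo_bump t c, combo_bump u c]; ring
      have h2 : (combo (bump t c)).2 - (combo (bump u c)).2 = (combo t).2 - (combo u).2 := by
        rw [combo_bump t c, combo_bump u c]; ring
      have hd : combo (bump t c)
          = ((combo (bump u c)).1 + ((combo t).1 - (combo u).1),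
             (combo (bump u c)).2 + ((combo t).2 - (combo u).2)) := by
        rw [Prod.ext_iff]; constructor <;> omega
      rw [← hd, ih (bump t c) (bump u c), h1, h2]

theorem eqPairs_map (f : Int × Int → Int × Int) (hf : Function.Injective f) (l : List (Int × Int)) :
    eqPairs (l.map f) = eqPairs l := by
  induction l with
  | nil => rfl
  | cons x xs ih =>
      rw [List.map_cons, eqPairs, eqPairs, ih, List.count_map_of_injective _ f hf]

theorem eqPairs_indep (t u : Int × Int × Int) (l : List Char) :
    eqPairs (combo t :: prefList t l) = eqPairs (combo u :: prefList u l) := by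
  have hsh : combo t :: prefList t l
      = (combo u :: prefList u l).map
          (fun p => (p.1 + ((combo t).1 - (combo u).1), p.2 + ((combo t).2 - (combo u).2))) := by
    rw [List.map_cons, ← prefList_shift t u l]
    have : combo t = ((combo u).1 + ((combo t).1 - (combo u).1),
                      (combo u).2 + ((combo t).2 - (combo u).2)) := by
      rw [Prod.ext_iff]; constructor <;> simp
    rw [← this]
  rw [hsh, eqPairs_map _ ?inj]
  case inj =>
    intro p q hpq
    rw [Prod.ext_iff] at hpq ⊢
    simp at hpq
    omega

theorem sum_drop_eq_eqPairs (l : List Char) :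
    ((List.range (l.length + 1)).map
        (fun i => (prefList (0, 0, 0) (l.drop i)).count (0, 0))).sum
      = eqPairs ((0, 0) :: prefList (0, 0, 0) l) := by
  induction l with
  | nil => simp [prefList, eqPairs]
  | cons c cs ih =>
      rw [show (c :: cs).length + 1 = (cs.length + 1) + 1 from rfl,
        List.range_succ_eq_map, List.map_cons, List.sum_cons, List.map_map]
      have htail : ((List.range (cs.length + 1)).map
          ((fun i => (prefList (0, 0, 0) ((c :: cs).drop i)).count (0, 0)) ∘ Nat.succ)).sum
          = ((List.range (cs.length + 1)).map
              (fun i => (prefList (0, 0, 0) (cs.drop i)).count (0, 0))).sum := by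
        rfl
      rw [htail, ih, List.drop_zero]
      have hrhs : eqPairs ((0, 0) :: prefList (0, 0, 0) (c :: cs))
          = (prefList (0, 0, 0) (c :: cs)).count (0, 0)
            + eqPairs ((0, 0) :: prefList (0, 0, 0) cs) := by
        rw [eqPairs]
        have : eqPairs (prefList (0, 0, 0) (c :: cs))
            = eqPairs ((0, 0) :: prefList (0, 0, 0) cs) := by
          rw [show prefList (0, 0, 0) (c :: cs)
              = combo (bump (0, 0, 0) c) :: prefList (bump (0, 0, 0) c) cs from rfl,
            eqPairs_indep (bump (0, 0, 0) c) (0, 0, 0) cs]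
          rfl
        rw [this]
      rw [hrhs]

theorem solve_alt_eq (s : String) :
    solve_alt s = (((List.range (s.toList.length + 1)).map
        (fun i => (prefList (0, 0, 0) (s.toList.drop i)).count (0, 0))).sum : Nat) := by
  rw [show solve_alt s = (PySem.List.pyRange 0 ((s.toList.length : Int) + 1)).foldl
      (fun total i =>
        ((PySem.List.slice s.toList (some i) none).foldl stepB ((0, 0, 0), total)).2) 0 from rfl]
  rw [show ((s.toList.length : Int) + 1) = ((s.toList.length + 1 : Nat) : Int) from by
    push_cast; ring]
  rw [PySem.List.pyRange_zero_natCast, List.foldl_map]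
  rw [PySem.List.foldl_congr_mem _ _
      (fun total k => total + ((prefList (0, 0, 0) (s.toList.drop k)).count (0, 0) : Int)) 0
      (fun acc k _ => by rw [PySem.List.slice_from_natCast, foldl_stepB_snd])]
  rw [PySem.List.foldl_add, zero_add, Nat.cast_list_sum, List.map_map]
  rfl

-- ===== VERDICT (by name: the statement is the Claim_ definition above) =====
theorem solve_spec : Claim_equal_solve := by
  intro s _
  unfold Spec_solve
  rw [solve_eq_g, g_eq_eqPairs, solve_alt_eq, sum_drop_eq_eqPairs]
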